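-- pv_equiv track=rewrite | github.com/wooooooooook/Alg | 프로그래머스/1/42840. 모의고사/모의고사.py | solution
-- ===== SOURCE A (Python) =====
-- def solution(answers):
--     one, two, three = [], [], []
--     score = [0 for _ in range(3)]
--     while len(one) < len(answers):
--         one += [1, 2, 3, 4, 5]
--         two += [2, 1, 2, 3, 2, 4, 2, 5]
--         three += [3, 3, 1, 1, 2, 2, 4, 4, 5, 5]
--     for i in range(len(answers)):
--         if answers[i] == one[i]: score[0] += 1
--         if answers[i] == two[i]: score[1] += 1
--         if answers[i] == three[i]: score[2] += 1
--     answer = []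
--     for i in range(len(score)):
--         if score[i] == max(score):
--             answer.append(i+1)
--     return answer
-- ===== SOURCE B (Python) =====
-- def solution(answers):
--     patterns = [(1, 2, 3, 4, 5), (2, 1, 2, 3, 2, 4, 2, 5), (3, 3, 1, 1, 2, 2, 4, 4, 5, 5)]
--     # Histogram pass: count occurrences of each (position mod 40, answer-value) pair.
--     # 40 = lcm(5, 8, 10), so each pattern's value is a function of the residue alone.
--     cnt = {}
--     for i, a in enumerate(answers):
--         k = (i % 40, a)
--         cnt[k] = cnt.get(k, 0) + 1
--     # Each score is a fixed 40-term sum of histogram lookups; the input is not rescanned.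
--     score = [sum(cnt.get((r, p[r % len(p)]), 0) for r in range(40)) for p in patterns]
--     m = max(score)
--     return [j + 1 for j in range(3) if score[j] == m]
-- ===== Notes on version B (the rewrite author's own statement) =====
-- stated objective: alternative
-- what changed: B replaces A's materialize-extended-key-lists-and-compare-elementwise scheme by a counting algorithm: one pass builds a histogram of (index mod 40, answer) pairs (40 = lcm of the pattern lengths), and each score is then a fixed 40-term sum of histogram lookups, so the input is scanned once with no per-pattern comparison pass.
import Mathlib
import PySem

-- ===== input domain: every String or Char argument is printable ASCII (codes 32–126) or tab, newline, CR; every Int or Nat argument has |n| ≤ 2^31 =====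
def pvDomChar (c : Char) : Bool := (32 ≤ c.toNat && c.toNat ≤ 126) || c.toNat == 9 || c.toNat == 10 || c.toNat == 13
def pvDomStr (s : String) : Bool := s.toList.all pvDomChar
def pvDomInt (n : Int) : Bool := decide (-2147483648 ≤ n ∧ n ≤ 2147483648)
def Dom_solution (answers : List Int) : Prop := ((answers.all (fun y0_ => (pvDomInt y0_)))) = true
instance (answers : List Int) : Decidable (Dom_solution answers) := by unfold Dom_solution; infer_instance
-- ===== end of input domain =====

-- B replaces A's extend-the-key-lists-and-compare scheme by a counting algorithm: one pass
-- builds a histogram of (index mod 40, answer) pairs, then each score is a fixed 40-term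
-- sum of histogram lookups (objective: alternative; same asymptotic cost).

-- ===== PORT A =====
-- the while-loop: extend the three key lists until one is at least as long as answers
def solExtend (n : Nat) (one two three : List Int) : List Int × List Int × List Int :=
  if one.length < n then
    solExtend n (one ++ [1, 2, 3, 4, 5]) (two ++ [2, 1, 2, 3, 2, 4, 2, 5])
      (three ++ [3, 3, 1, 1, 2, 2, 4, 4, 5, 5])
  else (one, two, three)
termination_by n - one.length
decreasing_by simp [List.length_append]; omega

def solution (answers : List Int) : List Int :=
  let n := answers.length
  let otf := solExtend n [] [] []
  let one := otf.1
  let two := otf.2.1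
  let three := otf.2.2
  -- for i in range(len(answers)): three independent score updates (indices always in range)
  let score := (List.range n).foldl (fun (s : Int × Int × Int) i =>
    let s := if answers.getD i 0 = one.getD i 0 then (s.1 + 1, s.2.1, s.2.2) else s
    let s := if answers.getD i 0 = two.getD i 0 then (s.1, s.2.1 + 1, s.2.2) else s
    if answers.getD i 0 = three.getD i 0 then (s.1, s.2.1, s.2.2 + 1) else s) (0, 0, 0)
  let scoreL := [score.1, score.2.1, score.2.2]
  let m := (PySem.List.max? scoreL (fun x => x)).getD 0   -- max(score): list is nonempty, getD never used
  (List.range 3).foldl (fun acc i => if scoreL.getD i 0 = m then acc ++ [(i : Int) + 1] else acc) []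

-- ===== PORT B =====
-- cnt[k] = cnt.get(k, 0) + 1 over (i % 40, a) for i, a in enumerate(answers)
def buildCnt (answers : List Int) : PySem.Dict (Int × Int) Int :=
  (PySem.List.enumerate answers 0).foldl (fun d ia =>
    let k : Int × Int := (PySem.Int.mod ia.1 40, ia.2)
    d.insert k (d.getD k 0 + 1)) PySem.Dict.empty

-- sum(cnt.get((r, p[r % len(p)]), 0) for r in range(40))
def patScore (cnt : PySem.Dict (Int × Int) Int) (p : List Int) : Int :=
  (List.range 40).foldl (fun (acc : Int) (r : Nat) =>
    acc + cnt.getD ((r : Int), PySem.List.pyGetD p (PySem.Int.mod (r : Int) (p.length : Int)) 0) 0) 0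

def solution_alt (answers : List Int) : List Int :=
  let patterns : List (List Int) :=
    [[1, 2, 3, 4, 5], [2, 1, 2, 3, 2, 4, 2, 5], [3, 3, 1, 1, 2, 2, 4, 4, 5, 5]]
  let cnt := buildCnt answers
  let score := patterns.map (fun p => patScore cnt p)
  let m := (PySem.List.max? score (fun x => x)).getD 0   -- max(score): list is nonempty, getD never used
  ((List.range 3).filter (fun j => score.getD j 0 = m)).map (fun (j : Nat) => (j : Int) + 1)

-- ===== PRECONDITION & SPEC =====
def Spec_solution (answers : List Int) (out : List Int) : Prop := out = solution_alt answers
instance (answers : List Int) (out : List Int) : Decidable (Spec_solution answers out) := by unfold Spec_solution; infer_instance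

-- ===== CLAIM (what is proved, stated in full; the proofs are below) =====
def Claim_equal_solution : Prop := ∀ (answers : List Int), Dom_solution answers → Spec_solution answers (solution answers)

-- ===== LEMMAS AND PROOFS =====

lemma rep_len (p : List Int) (a : Nat) : ((List.replicate a p).flatten).length = a * p.length := by
  induction a with
  | zero => simp
  | succ a ih => simp [List.replicate_succ, ih, Nat.succ_mul]; omega

lemma rep_snoc (p : List Int) (a : Nat) :
    (List.replicate a p).flatten ++ p = (List.replicate (a + 1) p).flatten := by
  rw [List.replicate_succ', List.flatten_append]; simp

lemma solExtend_spec (n a : Nat) :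
    ∃ k : Nat, n ≤ 5 * k ∧
      solExtend n ((List.replicate a [1, 2, 3, 4, 5]).flatten)
          ((List.replicate a [2, 1, 2, 3, 2, 4, 2, 5]).flatten)
          ((List.replicate a [3, 3, 1, 1, 2, 2, 4, 4, 5, 5]).flatten)
        = ((List.replicate k [1, 2, 3, 4, 5]).flatten,
           (List.replicate k [2, 1, 2, 3, 2, 4, 2, 5]).flatten,
           (List.replicate k [3, 3, 1, 1, 2, 2, 4, 4, 5, 5]).flatten) := by
  by_cases h : ((List.replicate a ([1, 2, 3, 4, 5] : List Int)).flatten).length < n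
  · obtain ⟨k, hk, heq⟩ := solExtend_spec n (a + 1)
    refine ⟨k, hk, ?_⟩
    rw [solExtend]
    rw [if_pos h, rep_snoc, rep_snoc, rep_snoc]
    exact heq
  · refine ⟨a, ?_, ?_⟩
    · rw [rep_len] at h; simp at h; omega
    · rw [solExtend, if_neg h]
termination_by n - 5 * a
decreasing_by rw [rep_len] at h; simp at h; omega

lemma flatten_rep_getD (p : List Int) (k i : Nat) (h : i < k * p.length) :
    ((List.replicate k p).flatten).getD i 0 = p.getD (i % p.length) 0 := by
  induction k generalizing i with
  | zero => omega
  | succ k ih =>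
    rw [List.replicate_succ, List.flatten_cons]
    by_cases hi : i < p.length
    · rw [List.getD_append _ _ _ _ hi, Nat.mod_eq_of_lt hi]
    · rw [Nat.not_lt] at hi
      rw [List.getD_append_right _ _ _ _ hi, Nat.mod_eq_sub_mod hi]
      exact ih (i - p.length) (by rw [Nat.succ_mul] at h; omega)

lemma fold_triple (L : List Nat) (p q r : Nat → Prop) [DecidablePred p] [DecidablePred q]
    [DecidablePred r] (a b c : Int) :
    L.foldl (fun (s : Int × Int × Int) i =>
        let s := if p i then (s.1 + 1, s.2.1, s.2.2) else s
        let s := if q i then (s.1, s.2.1 + 1, s.2.2) else s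
        if r i then (s.1, s.2.1, s.2.2 + 1) else s) (a, b, c)
      = (L.foldl (fun x i => if p i then x + 1 else x) a,
         L.foldl (fun x i => if q i then x + 1 else x) b,
         L.foldl (fun x i => if r i then x + 1 else x) c) := by
  induction L generalizing a b c with
  | nil => rfl
  | cons x L ih =>
    simp only [List.foldl_cons]
    by_cases hp : p x <;> by_cases hq : q x <;> by_cases hr : r x <;>
      simp [hp, hq, hr, ih]

lemma foldl_if_eq_countP (L : List Nat) (P : Nat → Prop) [DecidablePred P] (c : Int) :
    L.foldl (fun x i => if P i then x + 1 else x) c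
      = c + (L.countP (fun i => decide (P i)) : Int) := by
  induction L generalizing c with
  | nil => simp
  | cons x L ih =>
    by_cases hx : P x
    · simp [hx, ih]; ring
    · simp [hx, ih]

lemma foldl_add_eq_sum (L : List Nat) (g : Nat → Int) (c : Int) :
    L.foldl (fun a x => a + g x) c = c + (L.map g).sum := by
  induction L generalizing c with
  | nil => simp
  | cons x L ih => simp [ih]; ring

-- sum over range n of a function vanishing away from r0 < n
lemma sum_single (n r0 : Nat) (h : r0 < n) (f : Nat → Int) (hf : ∀ r, r ≠ r0 → f r = 0) :
    ((List.range n).map f).sum = f r0 := by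
  induction n with
  | zero => omega
  | succ n ih =>
    rw [List.range_succ, List.map_append, List.sum_append]
    simp only [List.map_cons, List.map_nil, List.sum_cons, List.sum_nil, add_zero]
    by_cases hr : r0 = n
    · subst hr
      have : ((List.range r0).map f).sum = 0 := by
        apply List.sum_eq_zero
        intro x hx
        simp only [List.mem_map, List.mem_range] at hx
        obtain ⟨r, hrr, rfl⟩ := hx
        exact hf r (by omega)
      rw [this, zero_add]
    · rw [hf n (fun hc => hr hc.symm), add_zero, ih (by omega)]

lemma sum_map_add_my (L : List Nat) (f g : Nat → Int) :
    (L.map (fun x => f x + g x)).sum = (L.map f).sum + (L.map g).sum := by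
  induction L with
  | nil => simp
  | cons x L ih => simp [ih]; ring

-- Σ_{r<40} count of (r, v r) in L = countP (fun q => q.2 = v q.1), when all first
-- components of L are naturals below 40.
lemma sum_count_eq_countP (L : List (Int × Int)) (v : Int → Int)
    (h : ∀ q ∈ L, ∃ r : Nat, r < 40 ∧ q.1 = (r : Int)) :
    ((List.range 40).map (fun r : Nat => (L.count ((r : Int), v (r : Int)) : Int))).sum
      = (L.countP (fun q => decide (q.2 = v q.1)) : Int) := by
  induction L with
  | nil => simp
  | cons q L ih =>
    have hL : ∀ q' ∈ L, ∃ r : Nat, r < 40 ∧ q'.1 = (r : Int) := fun q' hq' => h q' (.tail _ hq')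
    obtain ⟨r0, hr0, hq1⟩ := h q (.head _)
    have key : (fun r : Nat => (((q :: L).count ((r : Int), v (r : Int)) : Nat) : Int))
        = fun r : Nat => ((L.count ((r : Int), v (r : Int)) : Nat) : Int)
            + (if q = ((r : Int), v (r : Int)) then (1 : Int) else 0) := by
      funext r
      rw [List.count_cons]
      by_cases hqe : q = ((r : Int), v (r : Int))
      · simp [hqe]
      · simp [hqe]
    rw [key, sum_map_add_my]
    have hind : ((List.range 40).map
        (fun r : Nat => if q = ((r : Int), v (r : Int)) then (1 : Int) else 0)).sum
        = if q.2 = v q.1 then (1 : Int) else 0 := by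
      rw [sum_single 40 r0 hr0]
      · by_cases hv : q.2 = v q.1
        · rw [if_pos hv, if_pos]
          refine Prod.ext hq1 ?_
          rw [hq1] at hv; simpa using hv
        · rw [if_neg hv, if_neg]
          intro hc
          apply hv
          have h2 := congrArg Prod.snd hc
          have h1 := congrArg Prod.fst hc
          simp only at h1 h2
          rw [h2, h1]
      · intro r hr
        rw [if_neg]
        intro hc
        apply hr
        have h1 := congrArg Prod.fst hc
        simp only at h1
        rw [hq1] at h1
        exact_mod_cast h1.symm
    rw [hind, ih hL, List.countP_cons]
    by_cases hv : q.2 = v q.1 <;> simp [hv]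

-- the keys list B's histogram counts
def pvKeys (answers : List Int) : List (Int × Int) :=
  (PySem.List.enumerate answers 0).map (fun ia => (PySem.Int.mod ia.1 40, ia.2))

lemma buildCnt_getD (answers : List Int) (k : Int × Int) :
    (buildCnt answers).getD k 0 = ((pvKeys answers).count k : Int) := by
  have hmap : buildCnt answers
      = (pvKeys answers).foldl (fun d k => d.insert k (d.getD k 0 + 1)) PySem.Dict.empty := by
    unfold buildCnt pvKeys
    rw [List.foldl_map]
  rw [hmap, PySem.Dict.foldl_insert_getD_add_one_eq_counter, PySem.Dict.getD_counter]

lemma keys_mem_shape (answers : List Int) :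
    ∀ q ∈ pvKeys answers, ∃ r : Nat, r < 40 ∧ q.1 = (r : Int) := by
  intro q hq
  unfold pvKeys at hq
  simp only [List.mem_map] at hq
  obtain ⟨ia, hia, rfl⟩ := hq
  rw [PySem.List.mem_enumerate_iff] at hia
  obtain ⟨kk, hkk, rfl⟩ := hia
  refine ⟨kk % 40, Nat.mod_lt _ (by omega), ?_⟩
  simp only [Int.zero_add]
  have : (40 : Int) = ((40 : Nat) : Int) := by norm_num
  rw [this, PySem.Int.mod_natCast]

-- B's per-pattern score equals the straightforward match count, for p.length ∣ 40
lemma patScore_eq_countP (answers p : List Int) (hdvd : p.length ∣ 40) :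
    patScore (buildCnt answers) p
      = ((List.range answers.length).countP
          (fun i => decide (answers.getD i 0 = p.getD (i % p.length) 0)) : Int) := by
  unfold patScore
  rw [foldl_add_eq_sum, Int.zero_add]
  simp only [buildCnt_getD]
  rw [sum_count_eq_countP (pvKeys answers)
      (fun x => PySem.List.pyGetD p (PySem.Int.mod x (p.length : Int)) 0)
      (keys_mem_shape answers)]
  unfold pvKeys
  rw [List.countP_map]
  rw [PySem.List.enumerate_eq_map_pyRange (d := 0), List.countP_map, PySem.List.pyRange_one]
  rw [List.countP_map]
  congr 1
  apply List.countP_congr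
  intro i _
  simp only [Function.comp_apply, Int.zero_add]
  have h40 : (40 : Int) = ((40 : Nat) : Int) := by norm_num
  rw [PySem.List.pyGetD_natCast, h40, PySem.Int.mod_natCast, PySem.Int.mod_natCast,
    PySem.List.pyGetD_natCast, Nat.mod_mod_of_dvd i hdvd]

-- ===== VERDICT (by name: the statement is the Claim_ definition above) =====
theorem solution_spec : Claim_equal_solution := by
  intro answers _
  unfold Spec_solution solution solution_alt
  obtain ⟨k, hk, heq⟩ := solExtend_spec answers.length 0
  simp only [List.replicate, List.flatten_nil] at heq
  dsimp only
  rw [heq]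
  dsimp only
  rw [fold_triple]
  have hs : ∀ (p : List Int), 0 < p.length → p.length ∣ 40 → answers.length ≤ k * p.length →
      (List.range answers.length).foldl
          (fun x i => if answers.getD i 0 = ((List.replicate k p).flatten).getD i 0 then x + 1 else x) 0
        = patScore (buildCnt answers) p := by
    intro p hp hdvd hlen
    rw [patScore_eq_countP answers p hdvd, foldl_if_eq_countP, Int.zero_add]
    congr 1
    apply List.countP_congr
    intro i hi
    rw [List.mem_range] at hi
    rw [flatten_rep_getD p k i (by omega)]
  rw [hs [1, 2, 3, 4, 5] (by simp) (by norm_num) (by simp; omega),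
    hs [2, 1, 2, 3, 2, 4, 2, 5] (by simp) (by norm_num) (by simp; omega),
    hs [3, 3, 1, 1, 2, 2, 4, 4, 5, 5] (by simp) (by norm_num) (by simp; omega)]
  rw [PySem.List.foldl_append_ite]
  simp [List.map]
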